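-- pv_equiv track=rewrite | github.com/abbasmoosajee07/AdventofCode | 2025/06/2025Day06.py | traditional_math
-- ===== SOURCE A (Python) =====
-- from math import prod
--
-- def traditional_math(homework_sheet):
--     sheet_grid = [row.split() for row in homework_sheet]
--     all_problems = [[row[i] for row in sheet_grid] for i in range(len(sheet_grid[0]))]
--     total_sum = 0
--     for problem in all_problems:
--         problem_ints = list(map(int, problem[:-1]))
--         problem_ans = 0
--         if problem[-1] == '*':
--             problem_ans = prod(problem_ints)
--         elif problem[-1] == '+':
--             problem_ans = sum(problem_ints)
--         total_sum += problem_ans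
--     return total_sum
-- ===== SOURCE B (Python) =====
-- def traditional_math(homework_sheet):
--     rows = [row.split() for row in homework_sheet]
--     ops = rows[-1]
--     n = len(rows[0])
--     sums = [0] * n
--     prods = [1] * n
--     for row in rows[:-1]:
--         vals = [int(row[i]) for i in range(n)]
--         sums = [s + v for s, v in zip(sums, vals)]
--         prods = [p * v for p, v in zip(prods, vals)]
--     total = 0
--     for i in range(n):
--         op = ops[i]
--         if op == '*':
--             total += prods[i]
--         elif op == '+':
--             total += sums[i]
--     return total
-- ===== Notes on version B (the rewrite author's own statement) =====
-- stated objective: alternative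
-- what changed: B never builds the transposed column list: it reads the operator row once and folds the data rows in a single row-wise pass into per-column sum and product accumulator arrays, then picks per column by operator.
import Mathlib
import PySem

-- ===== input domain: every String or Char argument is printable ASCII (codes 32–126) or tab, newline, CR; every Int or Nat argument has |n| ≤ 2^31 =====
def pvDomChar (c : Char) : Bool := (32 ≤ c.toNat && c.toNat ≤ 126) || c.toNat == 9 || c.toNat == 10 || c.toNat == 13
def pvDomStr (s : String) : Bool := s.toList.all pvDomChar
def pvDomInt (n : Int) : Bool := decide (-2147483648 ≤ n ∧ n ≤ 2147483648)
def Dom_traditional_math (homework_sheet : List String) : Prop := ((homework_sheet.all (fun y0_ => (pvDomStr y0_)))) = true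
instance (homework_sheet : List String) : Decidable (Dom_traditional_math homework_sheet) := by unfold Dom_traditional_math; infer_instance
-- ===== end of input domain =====

-- B avoids building the transpose: it reads the operator row once and folds the data rows into
-- per-column sum and product accumulators in a single row-wise pass (objective: alternative decomposition).

-- ===== PORT A =====
def traditional_math (homework_sheet : List String) : Int :=
  let sheet_grid := homework_sheet.map (fun row => PySem.Str.split₀ row)
  let all_problems := (List.range (sheet_grid.headD []).length).map
    (fun i => sheet_grid.map (fun row => row.getD i ""))
  all_problems.foldl (fun total_sum problem =>
    let problem_ints := problem.dropLast.map (fun s => (PySem.Int.ofStr? s).getD 0)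
    let last := (PySem.List.pyGet? problem (-1)).getD ""
    let problem_ans : Int :=
      if last = "*" then problem_ints.prod
      else if last = "+" then problem_ints.sum
      else 0
    total_sum + problem_ans) 0

-- ===== PORT B =====
def traditional_math_alt (homework_sheet : List String) : Int :=
  let rows := homework_sheet.map (fun row => PySem.Str.split₀ row)
  let ops := (PySem.List.pyGet? rows (-1)).getD []
  let n := (rows.headD []).length
  let sp := rows.dropLast.foldl (fun (sp : List Int × List Int) row =>
      let vals := (List.range n).map (fun i => (PySem.Int.ofStr? (row.getD i "")).getD 0)
      (List.zipWith (· + ·) sp.1 vals, List.zipWith (· * ·) sp.2 vals))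
    (List.replicate n (0 : Int), List.replicate n (1 : Int))
  (List.range n).foldl (fun total i =>
      let op := ops.getD i ""
      if op = "*" then total + sp.2.getD i 0
      else if op = "+" then total + sp.1.getD i 0
      else total) 0

-- ===== PRECONDITION & SPEC =====
-- Pre_ excludes exactly the inputs where Python A raises: the empty sheet (IndexError on
-- sheet_grid[0]), a row shorter than the first row (IndexError on row[i]), and a non-last-row
-- cell in the first columns that int() rejects (ValueError).
def Pre_traditional_math (homework_sheet : List String) : Prop :=
  homework_sheet ≠ [] ∧
  (∀ row ∈ homework_sheet.map PySem.Str.split₀,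
      ((homework_sheet.map PySem.Str.split₀).headD []).length ≤ row.length) ∧
  (∀ row ∈ (homework_sheet.map PySem.Str.split₀).dropLast,
      ∀ i ∈ List.range ((homework_sheet.map PySem.Str.split₀).headD []).length,
        (PySem.Int.ofStr? (row.getD i "")).isSome = true)
instance (homework_sheet : List String) : Decidable (Pre_traditional_math homework_sheet) := by
  unfold Pre_traditional_math; infer_instance
def pvWitness_traditional_math : List String := ["1 2", "3 4", "+ *"]
def Spec_traditional_math (homework_sheet : List String) (out : Int) : Prop := out = traditional_math_alt homework_sheet
instance (homework_sheet : List String) (out : Int) : Decidable (Spec_traditional_math homework_sheet out) := by unfold Spec_traditional_math; infer_instance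

-- ===== CLAIM (what is proved, stated in full; the proofs are below) =====
def Claim_equal_traditional_math : Prop := ∀ (homework_sheet : List String), Dom_traditional_math homework_sheet → Pre_traditional_math homework_sheet → Spec_traditional_math homework_sheet (traditional_math homework_sheet)

-- ===== LEMMAS AND PROOFS =====

theorem zipWith_map_same {α β : Type} (h : β → β → β) (l : List α) (f g : α → β) :
    List.zipWith h (l.map f) (l.map g) = l.map (fun x => h (f x) (g x)) := by
  induction l with
  | nil => rfl
  | cons a t ih => simp [ih]

theorem getD_map_range {β : Type} [Inhabited β] (n i : Nat) (g : Nat → β) (d : β) (hi : i < n) :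
    ((List.range n).map g).getD i d = g i := by
  simp [List.getD_eq_getElem?_getD, hi]

-- the row-wise fold of B computes, per column, the initial value combined with the column sum / product
theorem fold_sp_eq (n : Nat) (rs : List (List String)) (F G : Nat → Int) :
    rs.foldl (fun (sp : List Int × List Int) row =>
        let vals := (List.range n).map (fun i => (PySem.Int.ofStr? (row.getD i "")).getD 0)
        (List.zipWith (· + ·) sp.1 vals, List.zipWith (· * ·) sp.2 vals))
      ((List.range n).map F, (List.range n).map G)
    = ((List.range n).map (fun i => F i + ((rs.map (fun row => (PySem.Int.ofStr? (row.getD i "")).getD 0)).sum)),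
       (List.range n).map (fun i => G i * ((rs.map (fun row => (PySem.Int.ofStr? (row.getD i "")).getD 0)).prod))) := by
  induction rs generalizing F G with
  | nil => simp
  | cons r t ih =>
      simp only [List.foldl_cons, zipWith_map_same]
      rw [ih]
      refine congrArg₂ Prod.mk ?_ ?_ <;>
      · apply List.map_congr_left; intro i _; simp; ring

theorem pyGet_neg_one {α : Type} (l : List α) (h : l ≠ []) :
    PySem.List.pyGet? l (-1) = l.getLast? := by
  have hl : 0 < l.length := List.length_pos_iff.mpr h
  simp [PySem.List.pyGet?, PySem.List.pyIdx?, List.getLast?_eq_getElem?]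
  rw [if_pos (by omega : 1 ≤ l.length)]
  rfl

theorem replicate_eq_map_range {β : Type} (n : Nat) (b : β) :
    List.replicate n b = (List.range n).map (fun _ => b) := by
  simp [List.map_const']

-- ===== VERDICT (by name: the statement is the Claim_ definition above) =====
theorem traditional_math_spec : Claim_equal_traditional_math := by
  intro hs _ hpre
  obtain ⟨hne, -, -⟩ := hpre
  unfold Spec_traditional_math traditional_math traditional_math_alt
  simp only []
  set grid := hs.map PySem.Str.split₀ with hgrid
  have hgne : grid ≠ [] := by simpa [hgrid] using hne
  set n := (grid.headD []).length with hn
  -- last row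
  obtain ⟨L, hL⟩ : ∃ L, grid.getLast? = some L :=
    Option.isSome_iff_exists.mp (List.getLast?_isSome.mpr hgne)
  rw [pyGet_neg_one grid hgne, hL]
  rw [replicate_eq_map_range, replicate_eq_map_range, fold_sp_eq]
  rw [List.foldl_map]
  apply PySem.List.foldl_congr_mem
  intro acc i hi
  have hiN : i < n := List.mem_range.mp hi
  have hcol_last : (PySem.List.pyGet? (grid.map (fun row => row.getD i "")) (-1)).getD "" = L.getD i "" := by
    rw [pyGet_neg_one _ (by simpa using hgne), List.getLast?_map, hL]
    rfl
  have hcol_ints : (grid.map (fun row => row.getD i "")).dropLast.map (fun s => (PySem.Int.ofStr? s).getD 0)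
      = grid.dropLast.map (fun row => (PySem.Int.ofStr? (row.getD i "")).getD 0) := by
    rw [← List.map_dropLast, List.map_map]; rfl
  simp only [hcol_last, hcol_ints, Option.getD_some, getD_map_range _ _ _ _ hiN]
  split_ifs <;> ring
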